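-- pv_equiv track=rewrite | github.com/inesbenhamza/skills_finder | notebooks/finetune_skill_hierarchy.py | parse_skill_tree
-- ===== SOURCE A (Python) =====
-- from typing import List, Tuple, Dict
--
-- def parse_skill_tree(tree_text: str) -> Dict[str, List[str]]:
--
--     hierarchy = {}
--     lines = tree_text.strip().split('\n')
--     stack = []
--
--     for line in lines:
--         if not line.strip():
--             continue
--
--
--         indent = len(line) - len(line.lstrip())
--         skill_name = line.strip().lower()
--
--
--         while stack and stack[-1][0] >= indent:
--             stack.pop()
--
--
--         if stack:
--             parent_path = stack[-1][1]
--             full_path = f"{parent_path} {skill_name}".strip()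
--         else:
--             full_path = skill_name
--
--         if stack:
--             parent = stack[-1][1]
--             if parent not in hierarchy:
--                 hierarchy[parent] = []
--             hierarchy[parent].append(full_path)
--         else:
--
--             if full_path not in hierarchy:
--                 hierarchy[full_path] = []
--
--         stack.append((indent, full_path))
--
--     return hierarchy
-- ===== SOURCE B (Python) =====
-- def parse_skill_tree(tree_text):
--     # Pass 1: strip/split once and keep only the non-blank lines as (indent, name).
--     entries = [(len(line) - len(line.lstrip()), line.strip().lower())
--                for line in tree_text.strip().split('\n') if line.strip()]
--     # Pass 2: resolve each entry's parent by scanning the already-resolved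
--     # entries (most recent first) for the nearest one with a smaller indent.
--     resolved = []
--     seen = []  # (indent, full_path) of processed entries, most recent first
--     for indent, name in entries:
--         parent = next((path for ind, path in seen if ind < indent), None)
--         full_path = name if parent is None else f"{parent} {name}".strip()
--         seen.insert(0, (indent, full_path))
--         resolved.append((parent, full_path))
--     # Pass 3: build the hierarchy from the resolved (parent, full_path) list.
--     hierarchy = {}
--     for parent, full_path in resolved:
--         if parent is None:
--             hierarchy.setdefault(full_path, [])
--         else:
--             hierarchy[parent] = hierarchy.get(parent, []) + [full_path]
--     return hierarchy
-- ===== Notes on version B (the rewrite author's own statement) =====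
-- stated objective: alternative
-- what changed: Replaces A's single loop with a mutable pop-stack by three separate passes: extract (indent, name) entries, resolve each entry's parent by a nearest-smaller-indent backward search over the full history of resolved entries, then build the hierarchy dict from the resolved (parent, path) pairs.
import Mathlib
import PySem

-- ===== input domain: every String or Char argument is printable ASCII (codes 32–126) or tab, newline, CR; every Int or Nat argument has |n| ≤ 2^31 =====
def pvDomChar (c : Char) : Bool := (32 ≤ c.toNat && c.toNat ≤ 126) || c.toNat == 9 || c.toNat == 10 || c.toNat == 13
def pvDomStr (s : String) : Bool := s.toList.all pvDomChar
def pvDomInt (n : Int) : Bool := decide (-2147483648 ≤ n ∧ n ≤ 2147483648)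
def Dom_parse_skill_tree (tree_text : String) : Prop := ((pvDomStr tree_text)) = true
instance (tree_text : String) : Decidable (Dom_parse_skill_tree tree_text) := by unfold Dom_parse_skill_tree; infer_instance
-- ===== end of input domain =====

-- B replaces A's mutable pop-stack with three passes (extract entries, resolve each
-- parent by a backward nearest-smaller-indent search over all previous entries, then
-- build the dict); objective: alternative structure, same observable result.

-- ===== PORT A =====
-- A's loop state: (hierarchy, stack); the stack is kept top-first (head = Python stack[-1]).
def pvStepA (st : PySem.Dict String (List String) × List (Int × String)) (line : String) :
    PySem.Dict String (List String) × List (Int × String) :=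
  if PySem.Str.strip line = "" then st
  else
    let indent : Int := PySem.Str.len line - PySem.Str.len (PySem.Str.lstrip line)
    let skill_name := PySem.Str.lower (PySem.Str.strip line)
    -- while stack and stack[-1][0] >= indent: stack.pop()
    let stack := st.2.dropWhile (fun p => decide (indent ≤ p.1))
    match stack with
    | (_, parent) :: _ =>
        let full_path := PySem.Str.strip (PySem.Str.join " " [parent, skill_name])
        let hierarchy := if (st.1).contains parent then st.1 else (st.1).insert parent []
        let hierarchy := hierarchy.modify parent [] (fun l => l ++ [full_path])
        (hierarchy, (indent, full_path) :: stack)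
    | [] =>
        let full_path := skill_name
        let hierarchy := if (st.1).contains full_path then st.1 else (st.1).insert full_path []
        (hierarchy, (indent, full_path) :: stack)

def parse_skill_tree (tree_text : String) : List (String × List String) :=
  -- lines = tree_text.strip().split('\n'); sep ≠ "", so split? is always some
  ((((PySem.Str.split? (PySem.Str.strip tree_text) "\n").getD []).foldl
      pvStepA (PySem.Dict.empty, [])).1).items

-- ===== PORT B =====
-- pass 1: the non-blank lines as (indent, lower-cased name)
def pvEntry (line : String) : Option (Int × String) :=
  if PySem.Str.strip line = "" then none
  else some (PySem.Str.len line - PySem.Str.len (PySem.Str.lstrip line),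
             PySem.Str.lower (PySem.Str.strip line))

-- pass 2 step: state (seen, resolved); seen = (indent, full_path) most recent first
def pvStepB (st : List (Int × String) × List (Option String × String)) (e : Int × String) :
    List (Int × String) × List (Option String × String) :=
  let parent := (st.1.find? (fun p => decide (p.1 < e.1))).map (fun p => p.2)
  let full_path := match parent with
    | none => e.2
    | some pp => PySem.Str.strip (PySem.Str.join " " [pp, e.2])
  ((e.1, full_path) :: st.1, st.2 ++ [(parent, full_path)])

-- pass 3 step: build the hierarchy dict from one resolved (parent, full_path) pair
def pvBuildB (h : PySem.Dict String (List String)) (r : Option String × String) :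
    PySem.Dict String (List String) :=
  match r.1 with
  | none => h.setdefault r.2 []
  | some p => h.insert p (h.getD p [] ++ [r.2])

def parse_skill_tree_alt (tree_text : String) : List (String × List String) :=
  (((((PySem.Str.split? (PySem.Str.strip tree_text) "\n").getD []).filterMap pvEntry).foldl
        pvStepB ([], [])).2.foldl pvBuildB PySem.Dict.empty).items

-- ===== PRECONDITION & SPEC =====
def Spec_parse_skill_tree (tree_text : String) (out : List (String × List String)) : Prop := out = parse_skill_tree_alt tree_text
instance (tree_text : String) (out : List (String × List String)) : Decidable (Spec_parse_skill_tree tree_text out) := by unfold Spec_parse_skill_tree; infer_instance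

-- ===== CLAIM (what is proved, stated in full; the proofs are below) =====
def Claim_equal_parse_skill_tree : Prop := ∀ (tree_text : String), Dom_parse_skill_tree tree_text → Spec_parse_skill_tree tree_text (parse_skill_tree tree_text)

-- ===== LEMMAS AND PROOFS =====

-- A's step, re-expressed on a pre-parsed entry (indent, name); used only by the proofs.
def pvGA (st : PySem.Dict String (List String) × List (Int × String)) (e : Int × String) :
    PySem.Dict String (List String) × List (Int × String) :=
  let stack := st.2.dropWhile (fun p => decide (e.1 ≤ p.1))
  match stack with
  | (_, parent) :: _ =>
      let full_path := PySem.Str.strip (PySem.Str.join " " [parent, e.2])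
      let hierarchy := if (st.1).contains parent then st.1 else (st.1).insert parent []
      let hierarchy := hierarchy.modify parent [] (fun l => l ++ [full_path])
      (hierarchy, (e.1, full_path) :: stack)
  | [] =>
      let hierarchy := if (st.1).contains e.2 then st.1 else (st.1).insert e.2 []
      (hierarchy, (e.1, e.2) :: stack)

lemma pvStepA_entry (st : PySem.Dict String (List String) × List (Int × String)) (line : String) :
    pvStepA st line = match pvEntry line with | none => st | some e => pvGA st e := by
  unfold pvStepA pvEntry
  by_cases hb : PySem.Str.strip line = ""
  · simp [hb]
  · simp [hb, pvGA]

lemma pv_foldl_lines (lines : List String)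
    (st : PySem.Dict String (List String) × List (Int × String)) :
    lines.foldl pvStepA st = (lines.filterMap pvEntry).foldl pvGA st := by
  induction lines generalizing st with
  | nil => rfl
  | cons l ls ih =>
    simp only [List.foldl_cons, List.filterMap_cons, pvStepA_entry]
    cases hE : pvEntry l <;> simp [ih]

-- The invariant tying A's pruned stack to B's full history `seen`:
-- for every indent, the first stack element below it is the first `seen` element below it.
def pvInv (stack seen : List (Int × String)) : Prop :=
  ∀ ind : Int, stack.find? (fun p => decide (p.1 < ind)) = seen.find? (fun p => decide (p.1 < ind))

lemma pvInv_nil : pvInv [] [] := fun _ => rfl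

lemma pv_find?_dropWhile {α : Type} (q P : α → Bool) (l : List α)
    (h : ∀ a, P a = true → q a = false) :
    (l.dropWhile P).find? q = l.find? q := by
  induction l with
  | nil => rfl
  | cons a tl ih =>
    by_cases hP : P a = true
    · rw [List.dropWhile_cons_of_pos hP, ih, List.find?_cons_of_neg (by simp [h a hP])]
    · rw [List.dropWhile_cons_of_neg (by simpa using hP)]

lemma pvInv_step (stack seen : List (Int × String)) (hInv : pvInv stack seen)
    (ind : Int) (fp : String) :
    pvInv ((ind, fp) :: stack.dropWhile (fun p => decide (ind ≤ p.1))) ((ind, fp) :: seen) := by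
  intro j
  by_cases hj : ind < j
  · rw [List.find?_cons_of_pos (by simpa using hj), List.find?_cons_of_pos (by simpa using hj)]
  · rw [List.find?_cons_of_neg (by simpa using hj), List.find?_cons_of_neg (by simpa using hj),
      pv_find?_dropWhile _ _ _ (by intro a ha; simp at ha ⊢; omega), hInv j]

-- A's pruned-stack head is exactly the nearest-smaller search on the stack.
lemma pv_head_dropWhile (l : List (Int × String)) (ind : Int) :
    (l.dropWhile (fun p => decide (ind ≤ p.1))).head? = l.find? (fun p => decide (p.1 < ind)) := by
  rw [List.find?_eq_head?_dropWhile_not]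
  have hp : (fun x : Int × String => !decide (x.1 < ind)) = fun p => decide (ind ≤ p.1) := by
    funext p
    by_cases h : p.1 < ind <;> simp [h, le_of_not_gt, not_le.mpr]
  rw [hp]

-- A's two-step dict update for a child equals B's single get/insert update.
lemma pv_upd (h : PySem.Dict String (List String)) (p fp : String) :
    ((if h.contains p then h else h.insert p []).modify p [] (fun l => l ++ [fp]))
      = h.insert p (h.getD p [] ++ [fp]) := by
  by_cases hc : h.contains p = true
  · simp [hc, PySem.Dict.modify]
  · rw [if_neg hc,
      show ((h.insert p []).modify p [] (fun l => l ++ [fp]))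
        = (h.insert p []).insert p ((h.insert p []).getD p [] ++ [fp]) from rfl,
      PySem.Dict.getD_insert_self, PySem.Dict.insert_insert_self,
      PySem.Dict.getD_of_not_contains h [] (by simpa using hc)]

-- B's pass-2 fold appends to the accumulated `resolved` list.
lemma pv_pass2_out (es : List (Int × String)) (seen : List (Int × String))
    (res : List (Option String × String)) :
    (es.foldl pvStepB (seen, res)).2 = res ++ (es.foldl pvStepB (seen, [])).2 := by
  induction es generalizing seen res with
  | nil => simp
  | cons e es ih =>
    simp only [List.foldl_cons, pvStepB, List.nil_append]
    rw [ih, ih ((e.1, _) :: seen) [_]]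
    simp

-- MAIN: under the invariant, folding A's steps computes the same dict as
-- B's resolve-then-build passes.
lemma pv_main (es : List (Int × String)) (h : PySem.Dict String (List String))
    (stack seen : List (Int × String)) (hInv : pvInv stack seen) :
    (es.foldl pvGA (h, stack)).1
      = ((es.foldl pvStepB (seen, [])).2).foldl pvBuildB h := by
  induction es generalizing h stack seen with
  | nil => rfl
  | cons e es ih =>
    simp only [List.foldl_cons]
    have hfind : (stack.dropWhile (fun p => decide (e.1 ≤ p.1))).head?
        = seen.find? (fun p => decide (p.1 < e.1)) := by
      rw [pv_head_dropWhile]; exact hInv e.1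
    rw [pv_pass2_out, List.foldl_append]
    rcases hs : stack.dropWhile (fun p => decide (e.1 ≤ p.1)) with _ | ⟨⟨i, parent⟩, rest⟩
    · -- no parent: root entry
      have hfnone : seen.find? (fun p => decide (p.1 < e.1)) = none := by
        rw [← hfind, hs]; rfl
      have hstep : pvGA (h, stack) e
          = (h.setdefault e.2 [], (e.1, e.2) :: stack.dropWhile (fun p => decide (e.1 ≤ p.1))) := by
        show (match stack.dropWhile (fun p => decide (e.1 ≤ p.1)) with
          | (_, parent) :: _ => _
          | [] => _) = _
        rw [hs]
        by_cases hc : h.contains e.2 = true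
        · simp [hc, PySem.Dict.setdefault_of_contains h [] hc]
        · simp [hc, PySem.Dict.setdefault_of_not_contains h [] (by simpa using hc)]
      simp only [pvStepB, hfnone, Option.map_none, List.nil_append, List.foldl_cons,
        List.foldl_nil, pvBuildB]
      rw [hstep, ih _ _ ((e.1, e.2) :: seen) (by rw [← hs] at *; exact pvInv_step _ _ hInv _ _)]
    · -- parent found
      have hfsome : seen.find? (fun p => decide (p.1 < e.1)) = some (i, parent) := by
        rw [← hfind, hs]; rfl
      have hstep : pvGA (h, stack) e
          = (h.insert parent (h.getD parent [] ++ [PySem.Str.strip (PySem.Str.join " " [parent, e.2])]),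
             (e.1, PySem.Str.strip (PySem.Str.join " " [parent, e.2]))
               :: stack.dropWhile (fun p => decide (e.1 ≤ p.1))) := by
        show (match stack.dropWhile (fun p => decide (e.1 ≤ p.1)) with
          | (_, parent) :: _ => _
          | [] => _) = _
        rw [hs, ← pv_upd]
      simp only [pvStepB, hfsome, Option.map_some, List.nil_append, List.foldl_cons,
        List.foldl_nil, pvBuildB]
      rw [hstep,
        ih _ _ ((e.1, PySem.Str.strip (PySem.Str.join " " [parent, e.2])) :: seen)
          (by rw [← hs] at *; exact pvInv_step _ _ hInv _ _)]

-- ===== VERDICT (by name: the statement is the Claim_ definition above) =====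
theorem parse_skill_tree_spec : Claim_equal_parse_skill_tree := by
  intro tree_text _
  unfold Spec_parse_skill_tree parse_skill_tree parse_skill_tree_alt
  rw [pv_foldl_lines, pv_main _ _ [] [] pvInv_nil]
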